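-- pv_equiv track=rewrite | github.com/EdwardZehuaZhang/3d-printing-monorepo | OpenVCAD-Public/test/stanford_bunny/body_and_path.py | mst_to_path
-- ===== SOURCE A (Python) =====
-- def mst_to_path(mst_edges, n):
--     adj = [[] for _ in range(n)]
--     for i, j in mst_edges:
--         adj[i].append(j)
--         adj[j].append(i)
--     visited = [False] * n
--     path = []
--
--     def dfs(node):
--         visited[node] = True
--         path.append(node)
--         for nbr in adj[node]:
--             if not visited[nbr]:
--                 dfs(nbr)
--                 path.append(node)
--
--     dfs(0)
--     return path
-- ===== SOURCE B (Python) =====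
-- def mst_to_path(mst_edges, n):
--     adj = [[] for _ in range(n)]
--     for i, j in mst_edges:
--         adj[i].append(j)
--         adj[j].append(i)
--     visited = [False] * n
--     visited[0] = True
--     path = [0]
--     stack = [(0, iter(adj[0]))]
--     while stack:
--         node, it = stack[-1]
--         for nbr in it:
--             if not visited[nbr]:
--                 visited[nbr] = True
--                 path.append(nbr)
--                 stack.append((nbr, iter(adj[nbr])))
--                 break
--         else:
--             stack.pop()
--             if stack:
--                 path.append(stack[-1][0])
--     return path
-- ===== Notes on version B (the rewrite author's own statement) =====
-- stated objective: alternative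
-- what changed: Replaces the recursive nested dfs closure with an explicit stack of (node, neighbor-iterator) frames driven by a single while loop, re-appending the parent whenever a child frame is popped.
import Mathlib
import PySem

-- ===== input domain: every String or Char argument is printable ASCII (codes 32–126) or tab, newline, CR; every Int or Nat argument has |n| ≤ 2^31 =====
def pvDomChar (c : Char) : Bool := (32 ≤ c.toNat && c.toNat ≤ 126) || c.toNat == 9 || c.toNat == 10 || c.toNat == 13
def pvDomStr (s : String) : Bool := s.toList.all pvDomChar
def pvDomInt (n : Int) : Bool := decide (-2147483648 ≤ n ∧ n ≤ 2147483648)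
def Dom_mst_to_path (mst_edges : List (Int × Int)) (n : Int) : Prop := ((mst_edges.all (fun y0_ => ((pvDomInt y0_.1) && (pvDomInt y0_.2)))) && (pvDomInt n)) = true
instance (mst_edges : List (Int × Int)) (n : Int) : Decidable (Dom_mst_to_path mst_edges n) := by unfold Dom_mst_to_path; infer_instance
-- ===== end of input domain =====

-- B replaces A's recursive dfs closure with an explicit stack of (node, remaining-neighbors)
-- frames; same return value (return-value equivalence; neither mutates its arguments).

-- ===== PORT A =====
-- Python list index with possible negative wrap-around (valid under Pre_, where -n ≤ i < n).
def pvNorm (n i : Int) : Nat := if i < 0 then (i + n).toNat else i.toNat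

-- adj = [[] for _ in range(n)]; for i, j in mst_edges: adj[i].append(j); adj[j].append(i)
def pvBuildAdj (mst_edges : List (Int × Int)) (n : Int) : List (List Int) :=
  mst_edges.foldl
    (fun adj e =>
      let adj1 := adj.set (pvNorm n e.1) ((adj.getD (pvNorm n e.1) []) ++ [e.2])
      adj1.set (pvNorm n e.2) ((adj1.getD (pvNorm n e.2) []) ++ [e.1]))
    (List.replicate n.toNat [])

-- A's recursive dfs; the fuel argument is only a totality guard (one unit per dfs call;
-- under Pre_ the initial fuel n+1 strictly exceeds the recursion depth, so it never runs out).
mutual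
def dfsA (fuel : Nat) (n : Int) (adj : List (List Int)) (u : Int)
    (st : List Bool × List Int) : List Bool × List Int :=
  match fuel with
  | 0 => st
  | f + 1 =>
      goA f n adj u (adj.getD (pvNorm n u) []) (st.1.set (pvNorm n u) true, st.2 ++ [u])
  termination_by (fuel, 0)

def goA (f : Nat) (n : Int) (adj : List (List Int)) (u : Int) (nbrs : List Int)
    (st : List Bool × List Int) : List Bool × List Int :=
  match nbrs with
  | [] => st
  | nbr :: rest =>
      if st.1.getD (pvNorm n nbr) false then goA f n adj u rest st
      else
        let st' := dfsA f n adj nbr st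
        goA f n adj u rest (st'.1, st'.2 ++ [u])
  termination_by (f, nbrs.length + 1)
end

def mst_to_path (mst_edges : List (Int × Int)) (n : Int) : List Int :=
  (dfsA (n.toNat + 1) n (pvBuildAdj mst_edges n) 0 (List.replicate n.toNat false, [])).2

-- ===== PORT B =====
-- B's explicit stack machine: frames hold (node, remaining neighbors of its iterator).
-- The fuel argument is only a totality guard (one unit per push; under Pre_ the initial
-- fuel n+1 strictly exceeds the number of pushes, so it never runs out).
def loopB (fuel : Nat) (n : Int) (adj : List (List Int)) (stk : List (Int × List Int))
    (st : List Bool × List Int) : List Bool × List Int :=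
  match stk with
  | [] => st
  | (u, nbrs) :: stk' =>
      match nbrs with
      | [] =>
          -- iterator exhausted: pop; if a frame remains, append its node (the parent)
          match stk' with
          | [] => st
          | (p, pn) :: tl => loopB fuel n adj ((p, pn) :: tl) (st.1, st.2 ++ [p])
      | nbr :: rest =>
          if st.1.getD (pvNorm n nbr) false then loopB fuel n adj ((u, rest) :: stk') st
          else
            match fuel with
            | 0 => st
            | f + 1 =>
                loopB f n adj ((nbr, adj.getD (pvNorm n nbr) []) :: (u, rest) :: stk')
                  (st.1.set (pvNorm n nbr) true, st.2 ++ [nbr])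
  termination_by (fuel, (stk.map (fun fr => fr.2.length)).sum + stk.length)

def mst_to_path_alt (mst_edges : List (Int × Int)) (n : Int) : List Int :=
  let adj := pvBuildAdj mst_edges n
  (loopB (n.toNat + 1) n adj [(0, adj.getD (pvNorm n 0) [])]
    ((List.replicate n.toNat false).set (pvNorm n 0) true, [0])).2

-- ===== PRECONDITION & SPEC =====
-- Pre_: exactly the inputs on which the Python A returns (n ≥ 1 and every edge endpoint a
-- valid Python index into a length-n list, i.e. in [-n, n)); elsewhere A raises IndexError.
def Pre_mst_to_path (mst_edges : List (Int × Int)) (n : Int) : Prop :=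
  1 ≤ n ∧ ∀ p ∈ mst_edges, -n ≤ p.1 ∧ p.1 < n ∧ -n ≤ p.2 ∧ p.2 < n
instance (mst_edges : List (Int × Int)) (n : Int) : Decidable (Pre_mst_to_path mst_edges n) := by
  unfold Pre_mst_to_path; infer_instance

def pvWitness_mst_to_path : (List (Int × Int)) × Int := ([(0, 1), (2, 1)], 3)

def Spec_mst_to_path (mst_edges : List (Int × Int)) (n : Int) (out : List Int) : Prop := out = mst_to_path_alt mst_edges n
instance (mst_edges : List (Int × Int)) (n : Int) (out : List Int) : Decidable (Spec_mst_to_path mst_edges n out) := by unfold Spec_mst_to_path; infer_instance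

-- ===== CLAIM (what is proved, stated in full; the proofs are below) =====
def Claim_equal_mst_to_path : Prop := ∀ (mst_edges : List (Int × Int)) (n : Int), Dom_mst_to_path mst_edges n → Pre_mst_to_path mst_edges n → Spec_mst_to_path mst_edges n (mst_to_path mst_edges n)

-- ===== LEMMAS AND PROOFS =====

-- every neighbor stored in the adjacency structure is a valid index
def adjOK (n : Int) (adj : List (List Int)) : Prop :=
  ∀ l ∈ adj, ∀ x ∈ l, -n ≤ x ∧ x < n

lemma pvNorm_lt {n x : Int} (hn : 1 ≤ n) (hlo : -n ≤ x) (hhi : x < n) :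
    pvNorm n x < n.toNat := by
  unfold pvNorm; split <;> omega

lemma count_false_set_true_le (vis : List Bool) (i : Nat) :
    (vis.set i true).count false ≤ vis.count false := by
  induction vis generalizing i with
  | nil => simp
  | cons b t ih =>
      cases i with
      | zero => cases b <;> simp
      | succ j => cases b <;> simpa using ih j

lemma count_false_set_true (vis : List Bool) (i : Nat) (hi : i < vis.length)
    (hv : vis.getD i false = false) :
    (vis.set i true).count false + 1 = vis.count false := by
  induction vis generalizing i with
  | nil => simp at hi
  | cons b t ih =>
      cases i with
      | zero => simp_all
      | succ j =>
          simp only [List.length_cons] at hi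
          simp only [List.getD_cons_succ] at hv
          cases b <;> simpa using ih j (by omega) hv

lemma count_false_pos (vis : List Bool) (i : Nat) (hi : i < vis.length)
    (hv : vis.getD i false = false) : 0 < vis.count false := by
  have hm : false ∈ vis := by
    rw [List.getD_eq_getElem _ _ hi] at hv
    exact hv ▸ vis.getElem_mem hi
  exact List.count_pos_iff.mpr hm

lemma adjOK_getD {n : Int} {adj : List (List Int)} (h : adjOK n adj) (k : Nat) :
    ∀ x ∈ adj.getD k [], -n ≤ x ∧ x < n := by
  intro x hx
  rcases lt_or_ge k adj.length with hk | hk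
  · rw [List.getD_eq_getElem _ _ hk] at hx
    exact h _ (adj.getElem_mem hk) x hx
  · rw [List.getD_eq_default _ _ hk] at hx
    simp at hx

-- length preservation and monotone count, for goA given it for dfsA at the same fuel
lemma goA_pres_of (f : Nat)
    (hd : ∀ n adj u st, ((dfsA f n adj u st).1.length = st.1.length) ∧
      ((dfsA f n adj u st).1.count false ≤ st.1.count false)) :
    ∀ nbrs n adj u st, ((goA f n adj u nbrs st).1.length = st.1.length) ∧
      ((goA f n adj u nbrs st).1.count false ≤ st.1.count false) := by
  intro nbrs
  induction nbrs with
  | nil => intro n adj u st; simp [goA]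
  | cons nbr rest ih =>
      intro n adj u st
      rw [goA]
      split
      · exact ih n adj u st
      · have h1 := hd n adj nbr st
        have h2 := ih n adj u ((dfsA f n adj nbr st).1, (dfsA f n adj nbr st).2 ++ [u])
        constructor
        · rw [h2.1]; exact h1.1
        · exact le_trans h2.2 h1.2

lemma dfsA_pres (f : Nat) :
    ∀ n adj u st, ((dfsA f n adj u st).1.length = st.1.length) ∧
      ((dfsA f n adj u st).1.count false ≤ st.1.count false) := by
  induction f with
  | zero => intro n adj u st; simp [dfsA]
  | succ f ih =>
      intro n adj u st
      rw [dfsA]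
      have h := goA_pres_of f ih (adj.getD (pvNorm n u) []) n adj u
        (st.1.set (pvNorm n u) true, st.2 ++ [u])
      constructor
      · rw [h.1]; exact st.1.length_set ..
      · exact le_trans h.2 (count_false_set_true_le st.1 (pvNorm n u))

lemma goA_pres (f : Nat) (nbrs : List Int) (n : Int) (adj : List (List Int)) (u : Int)
    (st : List Bool × List Int) :
    ((goA f n adj u nbrs st).1.length = st.1.length) ∧
      ((goA f n adj u nbrs st).1.count false ≤ st.1.count false) :=
  goA_pres_of f (dfsA_pres f) nbrs n adj u st

-- fuel irrelevance: with enough fuel (≥ number of unvisited cells) goA's value is fuel-independent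
lemma goA_fuel_congr :
    ∀ (c f₁ f₂ : Nat) (n : Int) (adj : List (List Int)) (u : Int) (nbrs : List Int)
      (st : List Bool × List Int),
      1 ≤ n → adjOK n adj → st.1.length = n.toNat →
      (∀ x ∈ nbrs, -n ≤ x ∧ x < n) →
      st.1.count false = c → c ≤ f₁ → c ≤ f₂ →
      goA f₁ n adj u nbrs st = goA f₂ n adj u nbrs st := by
  intro c
  induction c using Nat.strong_induction_on with
  | _ c IH =>
      intro f₁ f₂ n adj u nbrs st hn hadj hlen hnb hc h1 h2
      induction nbrs with
      | nil => simp [goA]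
      | cons nbr rest ihr =>
          rw [goA, goA]
          split
          · exact ihr (fun x hx => hnb x (List.mem_cons_of_mem _ hx))
          · rename_i hv
            simp only [Bool.not_eq_true] at hv
            have hnbr := hnb nbr (List.mem_cons_self ..)
            have hidx : pvNorm n nbr < st.1.length := by
              rw [hlen]; exact pvNorm_lt hn hnbr.1 hnbr.2
            have hpos : 0 < c := hc ▸ count_false_pos st.1 _ hidx hv
            obtain ⟨g₁, rfl⟩ : ∃ g, f₁ = g + 1 := ⟨f₁ - 1, by omega⟩
            obtain ⟨g₂, rfl⟩ : ∃ g, f₂ = g + 1 := ⟨f₂ - 1, by omega⟩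
            set st₁ : List Bool × List Int :=
              (st.1.set (pvNorm n nbr) true, st.2 ++ [nbr]) with hst₁
            have hc₁ : st₁.1.count false + 1 = c := by
              rw [hst₁, ← hc]; exact count_false_set_true st.1 _ hidx hv
            have hlen₁ : st₁.1.length = n.toNat := by
              rw [hst₁]; simpa [st.1.length_set ..] using hlen
            have hchild : dfsA (g₁ + 1) n adj nbr st = dfsA (g₂ + 1) n adj nbr st := by
              rw [dfsA, dfsA]
              exact IH _ (by omega) g₁ g₂ n adj nbr _ st₁ hn hadj hlen₁
                (adjOK_getD hadj _) rfl (by omega) (by omega)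
            rw [hchild]
            set st₂ := dfsA (g₂ + 1) n adj nbr st with hst₂
            have hp₂ : st₂.1.length = st.1.length ∧ st₂.1.count false ≤ st.1.count false :=
              dfsA_pres _ n adj nbr st
            have hlt : st₂.1.count false < c := by
              have : st₂.1.count false ≤ st₁.1.count false := by
                rw [hst₂, dfsA, ← hst₁]; exact (goA_pres ..).2
              omega
            exact IH _ hlt (g₁ + 1) (g₂ + 1) n adj u rest (st₂.1, st₂.2 ++ [u]) hn hadj
              (hp₂.1.trans hlen) (fun x hx => hnb x (List.mem_cons_of_mem _ hx)) rfl
              (by omega) (by omega)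

-- what B's loop does to the rest of the stack once the top frame is finished
def finishB (stk : List (Int × List Int)) (st : List Bool × List Int) :
    List Bool × List Int :=
  match stk with
  | [] => st
  | (p, _) :: _ => (st.1, st.2 ++ [p])

-- the bridge: running B's stack machine on a frame (u, nbrs) does exactly what A's
-- neighbor loop goA does, then continues on the rest of the stack with the leftover fuel
lemma bridge :
    ∀ (c f : Nat) (n : Int) (adj : List (List Int)) (u : Int) (nbrs : List Int)
      (stk : List (Int × List Int)) (st : List Bool × List Int),
      1 ≤ n → adjOK n adj → st.1.length = n.toNat →
      (∀ x ∈ nbrs, -n ≤ x ∧ x < n) →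
      st.1.count false = c → c ≤ f →
      loopB f n adj ((u, nbrs) :: stk) st =
        loopB (f - (c - (goA f n adj u nbrs st).1.count false)) n adj stk
          (finishB stk (goA f n adj u nbrs st)) := by
  intro c
  induction c using Nat.strong_induction_on with
  | _ c IH =>
      intro f n adj u nbrs stk st hn hadj hlen hnb hc hf
      induction nbrs with
      | nil =>
          simp only [goA]
          cases stk with
          | nil => rw [loopB.eq_def, loopB.eq_def]; simp [finishB]
          | cons fr stk' =>
              obtain ⟨p, pn⟩ := fr
              rw [loopB.eq_def]
              simp [finishB, hc]
      | cons nbr rest ihr =>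
          rw [goA, loopB.eq_def]
          simp only
          split
          · exact ihr (fun x hx => hnb x (List.mem_cons_of_mem _ hx))
          · rename_i hv
            simp only [Bool.not_eq_true] at hv
            have hnbr := hnb nbr (List.mem_cons_self ..)
            have hidx : pvNorm n nbr < st.1.length := by
              rw [hlen]; exact pvNorm_lt hn hnbr.1 hnbr.2
            have hpos : 0 < c := hc ▸ count_false_pos st.1 _ hidx hv
            obtain ⟨g, rfl⟩ : ∃ g, f = g + 1 := ⟨f - 1, by omega⟩
            simp only [Nat.add_sub_cancel]
            set st₁ : List Bool × List Int :=
              (st.1.set (pvNorm n nbr) true, st.2 ++ [nbr]) with hst₁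
            have hc₁ : st₁.1.count false + 1 = c := by
              rw [hst₁, ← hc]; exact count_false_set_true st.1 _ hidx hv
            have hlen₁ : st₁.1.length = n.toNat := by
              rw [hst₁]; simpa [st.1.length_set ..] using hlen
            -- child frame
            rw [IH _ (by omega) g n adj nbr (adj.getD (pvNorm n nbr) [])
              ((u, rest) :: stk) st₁ hn hadj hlen₁ (adjOK_getD hadj _) rfl (by omega)]
            set st₂ := goA g n adj nbr (adj.getD (pvNorm n nbr) []) st₁ with hst₂
            have hp₂ : st₂.1.length = st₁.1.length ∧ st₂.1.count false ≤ st₁.1.count false :=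
              goA_pres ..
            set c₂ := st₂.1.count false with hc₂
            set g' := g - (st₁.1.count false - c₂) with hg'
            have hg'c : c₂ ≤ g' := by omega
            simp only [finishB]
            set st₂' : List Bool × List Int := (st₂.1, st₂.2 ++ [u]) with hst₂'
            -- sibling frames
            rw [IH c₂ (by omega) g' n adj u rest stk st₂' hn hadj (hp₂.1.trans hlen₁)
              (fun x hx => hnb x (List.mem_cons_of_mem _ hx)) rfl hg'c]
            -- identify A's continuation: dfsA (g+1) nbr st = st₂, then fuel-congruence on rest
            have hA : dfsA (g + 1) n adj nbr st = st₂ := by rw [dfsA, hst₂, hst₁]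
            rw [hA]
            have hcong : goA (g + 1) n adj u rest st₂' = goA g' n adj u rest st₂' :=
              goA_fuel_congr c₂ (g + 1) g' n adj u rest st₂' hn hadj
                ((hp₂.1.trans hlen₁)) (fun x hx => hnb x (List.mem_cons_of_mem _ hx)) rfl
                (by omega) hg'c
            rw [← hst₂', hcong]
            have hle : (goA g' n adj u rest st₂').1.count false ≤ c₂ :=
              (goA_pres ..).2
            congr 1
            omega

lemma buildAdj_OK {mst_edges : List (Int × Int)} {n : Int}
    (hn : 1 ≤ n)
    (he : ∀ p ∈ mst_edges, -n ≤ p.1 ∧ p.1 < n ∧ -n ≤ p.2 ∧ p.2 < n) :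
    adjOK n (pvBuildAdj mst_edges n) := by
  unfold pvBuildAdj
  suffices h : ∀ (l : List (Int × Int)) (acc : List (List Int)),
      (∀ p ∈ l, -n ≤ p.1 ∧ p.1 < n ∧ -n ≤ p.2 ∧ p.2 < n) → adjOK n acc →
      adjOK n (l.foldl (fun adj e =>
        let adj1 := adj.set (pvNorm n e.1) ((adj.getD (pvNorm n e.1) []) ++ [e.2])
        adj1.set (pvNorm n e.2) ((adj1.getD (pvNorm n e.2) []) ++ [e.1])) acc) by
    refine h mst_edges _ he ?_
    intro l hl x hx
    rw [List.eq_of_mem_replicate hl] at hx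
    simp at hx
  intro l
  induction l with
  | nil => intro acc _ hacc; simpa using hacc
  | cons e tl ih =>
      intro acc hl hacc
      simp only [List.foldl_cons]
      refine ih _ (fun p hp => hl p (List.mem_cons_of_mem _ hp)) ?_
      have he' := hl e (List.mem_cons_self ..)
      have step : ∀ (a : List (List Int)) (k : Nat) (x : Int), adjOK n a →
          (-n ≤ x ∧ x < n) → adjOK n (a.set k ((a.getD k []) ++ [x])) := by
        intro a k x ha hx l' hl' y hy
        rcases List.mem_or_eq_of_mem_set hl' with h | h
        · exact ha _ h y hy
        · subst h
          rcases List.mem_append.mp hy with h | h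
          · exact adjOK_getD ha k y h
          · simp at h; subst h; exact hx
      exact step _ _ _ (step _ _ _ hacc ⟨he'.2.2.1, he'.2.2.2⟩) ⟨he'.1, he'.2.1⟩

-- ===== VERDICT (by name: the statement is the Claim_ definition above) =====
theorem mst_to_path_spec : Claim_equal_mst_to_path := by
  intro mst_edges n _ hpre
  obtain ⟨hn, he⟩ := hpre
  unfold Spec_mst_to_path mst_to_path mst_to_path_alt
  set adj := pvBuildAdj mst_edges n with hadj
  have hOK : adjOK n adj := buildAdj_OK hn he
  have h0 : pvNorm n (0 : Int) = 0 := by unfold pvNorm; norm_num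
  have hnn : 0 < n.toNat := by omega
  set vis₁ := (List.replicate n.toNat false).set 0 true with hvis₁
  have hlen₁ : vis₁.length = n.toNat := by
    simp [hvis₁]
  have hc₁ : vis₁.count false + 1 = n.toNat := by
    rw [hvis₁, count_false_set_true _ 0 (by simp; omega) (by
      rw [List.getD_eq_getElem _ _ (by simp; omega)]; simp)]
    simp
  rw [dfsA]
  simp only [h0]
  rw [bridge (vis₁.count false) (n.toNat + 1) n adj 0 (adj.getD 0 []) []
    (vis₁, [0]) hn hOK hlen₁ (adjOK_getD hOK 0) rfl (by omega)]
  rw [loopB.eq_def]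
  simp only [finishB]
  rw [goA_fuel_congr (vis₁.count false) (n.toNat + 1) n.toNat n adj 0 (adj.getD 0 [])
    (vis₁, [0]) hn hOK hlen₁ (adjOK_getD hOK 0) rfl (by omega) (by omega)]
  simp [hvis₁]
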